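-- pv_equiv track=rewrite | github.com/Nirusu99/practice-rs | py-practice/2020-2.py | cluster_by_ingredience
-- ===== SOURCE A (Python) =====
-- def cluster_by_ingredience(recipes: dict[str, list[str]]) -> dict[str, list[str]]:
--     d: dict[str, list[str]] = {}
--     for (meal, ls) in recipes.items():
--         for ing in ls:
--             if ing not in d:
--                 d[ing] = [meal]
--             else:
--                 d[ing] += [meal]
--     return d
-- ===== SOURCE B (Python) =====
-- def cluster_by_ingredience(recipes: dict[str, list[str]]) -> dict[str, list[str]]:
--     pairs = [(ing, meal) for meal, ls in recipes.items() for ing in ls]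
--     return {ing: [m for i, m in pairs if i == ing]
--             for ing in dict.fromkeys(i for i, _ in pairs)}
-- ===== Notes on version B (the rewrite author's own statement) =====
-- stated objective: alternative
-- what changed: Flattens the recipes into a flat (ingredient, meal) pair list and builds the result per distinct ingredient by filtering that list, instead of accumulating into a dict in a single mutating pass.
import Mathlib
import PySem

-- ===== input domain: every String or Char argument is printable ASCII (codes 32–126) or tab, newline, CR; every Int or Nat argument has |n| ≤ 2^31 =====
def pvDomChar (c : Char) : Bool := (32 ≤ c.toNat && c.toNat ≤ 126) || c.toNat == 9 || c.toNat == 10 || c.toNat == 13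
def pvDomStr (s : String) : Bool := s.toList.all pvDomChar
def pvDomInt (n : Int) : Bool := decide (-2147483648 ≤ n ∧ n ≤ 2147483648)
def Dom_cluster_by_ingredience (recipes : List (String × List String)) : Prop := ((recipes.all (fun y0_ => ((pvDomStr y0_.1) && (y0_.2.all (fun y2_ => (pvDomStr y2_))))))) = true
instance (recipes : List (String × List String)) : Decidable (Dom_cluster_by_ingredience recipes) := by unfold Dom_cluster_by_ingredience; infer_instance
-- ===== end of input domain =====

-- B replaces A's single mutating accumulate-into-dict pass by a flatten-then-group pipeline
-- (flat (ingredient, meal) pair list, result built per distinct ingredient); alternative, not faster.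


-- ===== PORT A =====
-- 'if ing not in d: d[ing] = [meal] else: d[ing] += [meal]' inside 'for ing in ls' inside 'for (meal, ls) in recipes.items()'
def cluster_by_ingredience (recipes : List (String × List String)) : List (String × List String) :=
  (recipes.foldl (fun d p =>
      p.2.foldl (fun d ing =>
        match d.get? ing with
        | none => d.insert ing [p.1]          -- ing not in d
        | some v => d.insert ing (v ++ [p.1]) -- d[ing] += [meal]
        ) d)
    (PySem.Dict.empty : PySem.Dict String (List String))).items

-- ===== PORT B =====
-- pairs = [(ing, meal) ...]; {ing: [m for i, m in pairs if i == ing] for ing in dict.fromkeys(...)}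
def cluster_by_ingredience_alt (recipes : List (String × List String)) : List (String × List String) :=
  let pairs := recipes.flatMap (fun p => p.2.map (fun ing => (ing, p.1)))
  ((PySem.List.dedup (pairs.map (·.1))).foldl
      (fun d ing => d.insert ing ((pairs.filter (fun q => q.1 == ing)).map (·.2)))
      (PySem.Dict.empty : PySem.Dict String (List String))).items

-- ===== PRECONDITION & SPEC =====
def Spec_cluster_by_ingredience (recipes : List (String × List String)) (out : List (String × List String)) : Prop := out = cluster_by_ingredience_alt recipes
instance (recipes : List (String × List String)) (out : List (String × List String)) : Decidable (Spec_cluster_by_ingredience recipes out) := by unfold Spec_cluster_by_ingredience; infer_instance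

-- ===== CLAIM (what is proved, stated in full; the proofs are below) =====
def Claim_equal_cluster_by_ingredience : Prop := ∀ (recipes : List (String × List String)), Dom_cluster_by_ingredience recipes → Spec_cluster_by_ingredience recipes (cluster_by_ingredience recipes)

-- ===== LEMMAS AND PROOFS =====

-- A's single step on one (ingredient, meal) occurrence is a 'modify … (· ++ [meal])'.
theorem stepA_eq_modify (d : PySem.Dict String (List String)) (ing meal : String) :
    (match d.get? ing with
     | none => d.insert ing [meal]
     | some v => d.insert ing (v ++ [meal])) = d.modify ing [] (· ++ [meal]) := by
  cases h : d.get? ing with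
  | none =>
      simp [PySem.Dict.modify, PySem.Dict.getD_eq_get?_getD, h]
  | some v =>
      simp [PySem.Dict.modify, PySem.Dict.getD_eq_get?_getD, h]

-- A's nested loop over recipes is the same modify-fold over the flat pair list.
theorem clusterA_eq_pairs_fold (recipes : List (String × List String)) :
    recipes.foldl (fun d p =>
        p.2.foldl (fun d ing =>
          match d.get? ing with
          | none => d.insert ing [p.1]
          | some v => d.insert ing (v ++ [p.1])) d)
      (PySem.Dict.empty : PySem.Dict String (List String))
    = (recipes.flatMap (fun p => p.2.map (fun ing => (ing, p.1)))).foldl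
        (fun d q => d.modify q.1 [] (· ++ [q.2])) PySem.Dict.empty := by
  rw [List.flatMap, List.foldl_flatten, List.foldl_map]
  apply List.foldl_ext
  intro d p _
  rw [List.foldl_map]
  apply List.foldl_ext
  intro d' ing _
  exact stepA_eq_modify d' ing p.1

-- ===== VERDICT (by name: the statement is the Claim_ definition above) =====
theorem cluster_by_ingredience_spec : Claim_equal_cluster_by_ingredience := by
  intro recipes _
  show cluster_by_ingredience recipes = cluster_by_ingredience_alt recipes
  unfold cluster_by_ingredience cluster_by_ingredience_alt
  rw [clusterA_eq_pairs_fold]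
  set pairs := recipes.flatMap (fun p => p.2.map (fun ing => (ing, p.1))) with hp
  set D := pairs.foldl (fun d q => d.modify q.1 [] (· ++ [q.2]))
             (PySem.Dict.empty : PySem.Dict String (List String)) with hD
  have hnd : D.keys.Nodup := by
    rw [hD]
    exact PySem.Dict.nodup_keys_foldl_modify_key pairs (·.1) [] (fun d q => (· ++ [q.2]))
      PySem.Dict.empty (by simp)
  have hkeys : D.keys = PySem.List.dedup (pairs.map (·.1)) := by
    rw [hD, PySem.Dict.keys_foldl_modify_key]
    simp [PySem.Dict.keys_empty, PySem.Set.update_nil_left, PySem.List.dedup_eq_ofList]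
  have hget : ∀ c, D.getD c [] = (pairs.filter (fun q => q.1 == c)).map (·.2) := by
    intro c
    rw [hD, PySem.Dict.getD_foldl_modify_append]
    simp [PySem.Dict.getD_empty]
  rw [PySem.Dict.items_eq_map_keys D hnd []]
  show _ = ((PySem.List.dedup (pairs.map (·.1))).foldl
      (fun d ing => d.insert ing ((pairs.filter (fun q => q.1 == ing)).map (·.2)))
      (PySem.Dict.empty : PySem.Dict String (List String))).items
  have hB := PySem.Dict.items_foldl_insert_fresh
        (l := PySem.List.dedup (pairs.map (·.1)))
        (fun ing => ing)
        (fun ing => (pairs.filter (fun q => q.1 == ing)).map (·.2))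
        (PySem.Dict.empty : PySem.Dict String (List String))
        (by intro a _; exact PySem.Dict.contains_empty a)
        (by simp)
  simp only at hB
  rw [hB, hkeys]
  apply List.map_congr_left
  intro ing _
  rw [hget]
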